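-- pv_equiv track=rewrite | github.com/pypi-data/pypi-mirror-399 | packages/homcloud/homcloud-5.2.0-cp312-cp312-manylinux_2_28_x86_64.whl/homcloud/simplicial_levelset.py | normalize_simplicial_function
-- ===== SOURCE A (Python) =====
-- def normalize_simplicial_function(fun):
--     retval = dict()
--     for simplex, level in fun.items():
--         simplex = tuple(sorted(simplex))
--         if simplex in retval:
--             raise (ValueError("duplicated simplex"))
--
--         retval[simplex] = level
--
--     return retval
-- ===== SOURCE B (Python) =====
-- def normalize_simplicial_function(fun):
--     items = [(tuple(sorted(s)), v) for s, v in fun.items()]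
--     ordered = sorted(k for k, _ in items)
--     for a, b in zip(ordered, ordered[1:]):
--         if a == b:
--             raise ValueError("duplicated simplex")
--     return dict(items)
-- ===== Notes on version B (the rewrite author's own statement) =====
-- stated objective: alternative
-- what changed: Duplicate detection is done by sorting the normalized keys and scanning adjacent pairs (sort-based) instead of A's incremental hash-dict membership test, and the result dict is built in one shot from the precomputed item list rather than interleaved with the check.
import Mathlib
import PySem

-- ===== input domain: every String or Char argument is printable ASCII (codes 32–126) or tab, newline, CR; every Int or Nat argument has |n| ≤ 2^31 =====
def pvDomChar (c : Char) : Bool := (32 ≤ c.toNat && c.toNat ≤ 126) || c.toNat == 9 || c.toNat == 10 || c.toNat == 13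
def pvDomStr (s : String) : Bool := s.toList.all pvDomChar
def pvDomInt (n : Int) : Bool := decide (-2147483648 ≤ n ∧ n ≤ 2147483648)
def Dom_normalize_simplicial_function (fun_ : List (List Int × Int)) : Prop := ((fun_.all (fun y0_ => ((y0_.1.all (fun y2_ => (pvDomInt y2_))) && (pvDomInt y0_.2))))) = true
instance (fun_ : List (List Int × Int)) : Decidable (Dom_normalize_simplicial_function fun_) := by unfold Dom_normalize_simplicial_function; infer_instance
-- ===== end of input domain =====

-- B detects duplicates by sorting the normalized keys and scanning adjacent pairs (sort-based
-- instead of A's incremental hash-dict membership test), then builds the dict in one shot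
-- (objective: alternative).


-- ===== PORT A =====
-- for simplex, level in fun.items(): simplex = tuple(sorted(simplex)); if simplex in retval: raise; retval[simplex] = level
-- the 'raise ValueError' path returns the dict built so far; it is excluded by Pre_.
def normalize_simplicial_function (fun_ : List (List Int × Int)) : List (List Int × Int) :=
  (fun_.foldl
    (fun (retval : PySem.Dict (List Int) Int) p =>
      let simplex := PySem.List.sorted p.1 (fun x => x) false
      if retval.contains simplex then retval  -- raise ValueError("duplicated simplex")
      else retval.insert simplex p.2)
    PySem.Dict.empty).items

-- ===== PORT B =====
-- items = [(tuple(sorted(s)), v) for s, v in fun.items()]; ordered = sorted(k for k, _ in items);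
-- for a, b in zip(ordered, ordered[1:]): if a == b: raise; return dict(items)
-- the raise path returns []; it is excluded by Pre_.
def normalize_simplicial_function_alt (fun_ : List (List Int × Int)) : List (List Int × Int) :=
  let items := fun_.map (fun p => (PySem.List.sorted p.1 (fun x => x) false, p.2))
  let ordered := PySem.List.sorted (items.map Prod.fst) (fun x => x) false
  if (ordered.zip ordered.tail).any (fun q => q.1 == q.2) then []  -- raise ValueError("duplicated simplex")
  else (PySem.Dict.ofList items).items

-- ===== PRECONDITION & SPEC =====
-- Pre_ excludes exactly the inputs on which the Python A raises ValueError("duplicated simplex"):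
-- those whose normalized (sorted) keys contain a duplicate.
def Pre_normalize_simplicial_function (fun_ : List (List Int × Int)) : Prop :=
  (fun_.map (fun p => PySem.List.sorted p.1 (fun x => x) false)).Nodup
instance (fun_ : List (List Int × Int)) : Decidable (Pre_normalize_simplicial_function fun_) := by unfold Pre_normalize_simplicial_function; infer_instance
def pvWitness_normalize_simplicial_function : (List (List Int × Int)) := [([3, 1], 5), ([2], 7), ([1, 3, 0], 9)]
def Spec_normalize_simplicial_function (fun_ : List (List Int × Int)) (out : List (List Int × Int)) : Prop := out = normalize_simplicial_function_alt fun_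
instance (fun_ : List (List Int × Int)) (out : List (List Int × Int)) : Decidable (Spec_normalize_simplicial_function fun_ out) := by unfold Spec_normalize_simplicial_function; infer_instance

-- ===== CLAIM (what is proved, stated in full; the proofs are below) =====
def Claim_equal_normalize_simplicial_function : Prop := ∀ (fun_ : List (List Int × Int)), Dom_normalize_simplicial_function fun_ → Pre_normalize_simplicial_function fun_ → Spec_normalize_simplicial_function fun_ (normalize_simplicial_function fun_)

-- ===== LEMMAS AND PROOFS =====

-- a duplicate-free list has no equal adjacent pair
theorem pv_no_adjacent_dup {α : Type} [BEq α] [LawfulBEq α] (l : List α) (h : l.Nodup) :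
    (l.zip l.tail).any (fun q => q.1 == q.2) = false := by
  induction l with
  | nil => rfl
  | cons a t ih =>
      cases t with
      | nil => rfl
      | cons b t' =>
          have hab : a ≠ b := by
            intro he; exact (List.nodup_cons.mp h).1 (he ▸ List.mem_cons_self ..)
          simp only [List.tail_cons, List.zip_cons_cons, List.any_cons]
          have := ih (List.nodup_cons.mp h).2
          simp only [List.tail_cons] at this
          simp only [this, Bool.or_false]
          simpa using hab

-- A's loop over fresh distinct keys appends each normalized pair.
theorem pv_foldA (l : List (List Int × Int)) (d : PySem.Dict (List Int) Int)
    (hfresh : ∀ p ∈ l, d.contains (PySem.List.sorted p.1 (fun x => x) false) = false)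
    (hnd : (l.map (fun p => PySem.List.sorted p.1 (fun x => x) false)).Nodup) :
    (l.foldl
      (fun (retval : PySem.Dict (List Int) Int) p =>
        let simplex := PySem.List.sorted p.1 (fun x => x) false
        if retval.contains simplex then retval
        else retval.insert simplex p.2) d).items
    = d.items ++ l.map (fun p => (PySem.List.sorted p.1 (fun x => x) false, p.2)) := by
  induction l generalizing d with
  | nil => simp
  | cons p rest ih =>
      simp only [List.map_cons, List.nodup_cons, List.mem_map] at hnd
      have hc : d.contains (PySem.List.sorted p.1 (fun x => x) false) = false :=
        hfresh p (List.mem_cons_self ..)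
      simp only [List.foldl_cons, hc, Bool.false_eq_true, if_false]
      rw [ih]
      · rw [PySem.Dict.items_insert_of_not_contains _ _ hc]
        simp
      · intro q hq
        rw [PySem.Dict.contains_insert]
        have h1 : PySem.List.sorted q.1 (fun x => x) false ≠ PySem.List.sorted p.1 (fun x => x) false := by
          intro he; exact hnd.1 ⟨q, hq, he⟩
        simp [h1, hfresh q (List.mem_cons_of_mem _ hq)]
      · exact hnd.2

theorem normalize_simplicial_function_spec_aux (fun_ : List (List Int × Int))
    (hp : Pre_normalize_simplicial_function fun_) :
    normalize_simplicial_function fun_ = normalize_simplicial_function_alt fun_ := by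
  unfold Pre_normalize_simplicial_function at hp
  unfold normalize_simplicial_function normalize_simplicial_function_alt
  set items := fun_.map (fun p => (PySem.List.sorted p.1 (fun x => x) false, p.2)) with hitems
  have hkeys : items.map Prod.fst = fun_.map (fun p => PySem.List.sorted p.1 (fun x => x) false) := by
    simp [hitems]
  have hordnd : (PySem.List.sorted (items.map Prod.fst) (fun x => x) false).Nodup :=
    (PySem.List.sorted_perm _ _ _).nodup_iff.mpr (hkeys ▸ hp)
  rw [if_neg (by rw [pv_no_adjacent_dup _ hordnd]; simp)]
  rw [pv_foldA _ _ (by intro p _; simp [PySem.Dict.contains_empty]) hp]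
  rw [PySem.Dict.ofList]
  rw [show ∀ (ps : List (List Int × Int)), PySem.Dict.empty.update ps
        = ps.foldl (fun (d : PySem.Dict (List Int) Int) a => d.insert a.1 a.2) PySem.Dict.empty
      from fun ps => rfl]
  rw [PySem.Dict.items_foldl_insert_fresh _ Prod.fst Prod.snd _
      (by intro a _; simp [PySem.Dict.contains_empty]) (by rw [hkeys]; exact hp)]
  simp [hitems]

-- ===== VERDICT (by name: the statement is the Claim_ definition above) =====
theorem normalize_simplicial_function_spec : Claim_equal_normalize_simplicial_function := by
  intro fun_ _ hp
  unfold Spec_normalize_simplicial_function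
  exact normalize_simplicial_function_spec_aux fun_ hp
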